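-- pv_equiv track=rewrite | github.com/bbhunter/OpenDoor | src/lib/reporter/plugins/html.py | _get_columns
-- ===== SOURCE A (Python) =====
-- def _get_columns(items):
--     """
--     Return stable table columns for report item dictionaries.
--
--     :param list items: report item dictionaries
--     :return: ordered column names
--     :rtype: list
--     """
--
--     preferred = [
--         'url',
--         'code',
--         'size',
--         'title',
--         'redirect',
--         'content_type',
--         'waf',
--         'waf_confidence',
--         'bypass',
--         'bypass_header',
--         'bypass_value',
--         'bypass_from_code',
--         'bypass_to_code',
--     ]
--
--     existing = []
--
--     for item in items:
--         for key in item.keys():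
--             if key not in existing:
--                 existing.append(key)
--
--     columns = [
--         key
--         for key in preferred
--         if key in existing
--     ]
--
--     columns.extend([
--         key
--         for key in existing
--         if key not in columns
--     ])
--
--     return columns
-- ===== SOURCE B (Python) =====
-- def _get_columns(items):
--     """
--     Return stable table columns for report item dictionaries.
--
--     :param list items: report item dictionaries
--     :return: ordered column names
--     :rtype: list
--     """
--
--     preferred = [
--         'url',
--         'code',
--         'size',
--         'title',
--         'redirect',
--         'content_type',
--         'waf',
--         'waf_confidence',
--         'bypass',
--         'bypass_header',
--         'bypass_value',
--         'bypass_from_code',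
--         'bypass_to_code',
--     ]
--
--     # ordered-distinct keys by first appearance
--     existing = list(dict.fromkeys(key for item in items for key in item))
--
--     # single bucket pass: preferred keys land in their preferred slot,
--     # everything else keeps first-appearance order in the overflow slot
--     n = len(preferred)
--     buckets = [[] for _ in range(n + 1)]
--     for key in existing:
--         buckets[preferred.index(key) if key in preferred else n].append(key)
--
--     return [key for bucket in buckets for key in bucket]
-- ===== Notes on version B (the rewrite author's own statement) =====
-- stated objective: alternative
-- what changed: Replaces A's two filtering comprehensions (scan preferred filtering by membership in existing, then scan existing filtering by membership in columns) with a dict.fromkeys dedup plus a single bucket pass that drops each distinct key into its preferred-rank slot (or an overflow slot) and flattens the buckets.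
import Mathlib
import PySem

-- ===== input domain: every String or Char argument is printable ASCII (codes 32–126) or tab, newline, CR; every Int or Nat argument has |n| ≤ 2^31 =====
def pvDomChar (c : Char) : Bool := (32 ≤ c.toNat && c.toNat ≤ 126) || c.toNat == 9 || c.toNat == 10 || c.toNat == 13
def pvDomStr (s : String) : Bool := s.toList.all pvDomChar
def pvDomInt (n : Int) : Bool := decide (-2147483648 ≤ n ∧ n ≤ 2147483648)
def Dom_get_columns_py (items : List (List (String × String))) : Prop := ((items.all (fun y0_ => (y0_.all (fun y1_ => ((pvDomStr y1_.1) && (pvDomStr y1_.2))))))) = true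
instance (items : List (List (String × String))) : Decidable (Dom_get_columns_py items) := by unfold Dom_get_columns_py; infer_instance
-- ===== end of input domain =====

-- B replaces A's two filtering comprehensions with a dict.fromkeys dedup plus a single
-- bucket pass over the distinct keys (preferred-rank slot or overflow slot), then flattens.

-- shared constant: the preferred column order
def pvPreferred : List String :=
  ["url", "code", "size", "title", "redirect", "content_type", "waf", "waf_confidence",
   "bypass", "bypass_header", "bypass_value", "bypass_from_code", "bypass_to_code"]

-- ===== PORT A =====
-- the nested for-loops building `existing`
def pvExistingA (items : List (List (String × String))) : List String :=
  items.foldl (fun existing item =>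
    (item.map Prod.fst).foldl
      (fun existing key => if key ∈ existing then existing else existing ++ [key]) existing) []

-- the first comprehension
def pvColumnsA (items : List (List (String × String))) : List String :=
  pvPreferred.filter (fun key => decide (key ∈ pvExistingA items))

def get_columns_py (items : List (List (String × String))) : List String :=
  pvColumnsA items ++ (pvExistingA items).filter (fun key => decide (key ∉ pvColumnsA items))

-- ===== PORT B =====
-- existing = list(dict.fromkeys(key for item in items for key in item))
def pvExistingB (items : List (List (String × String))) : List String :=
  PySem.List.dedup (items.flatMap (fun item => item.map Prod.fst))

def get_columns_py_alt (items : List (List (String × String))) : List String :=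
  ((pvExistingB items).foldl
    (fun buckets key =>
      buckets.modify (if key ∈ pvPreferred then pvPreferred.idxOf key else pvPreferred.length)
        (fun bucket => bucket ++ [key]))
    (List.replicate (pvPreferred.length + 1) [])).flatMap id

-- ===== PRECONDITION & SPEC =====
def Spec_get_columns_py (items : List (List (String × String))) (out : List String) : Prop := out = get_columns_py_alt items
instance (items : List (List (String × String))) (out : List String) : Decidable (Spec_get_columns_py items out) := by unfold Spec_get_columns_py; infer_instance

-- ===== CLAIM (what is proved, stated in full; the proofs are below) =====
def Claim_equal_get_columns_py : Prop := ∀ (items : List (List (String × String))), Dom_get_columns_py items → Spec_get_columns_py items (get_columns_py items)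

-- ===== LEMMAS AND PROOFS =====

-- A's dedup loop is dict.fromkeys of the flattened key stream
lemma pvExistingA_eq (items : List (List (String × String))) :
    pvExistingA items = pvExistingB items := by
  unfold pvExistingA pvExistingB
  rw [PySem.List.dedup_eq_ofList, PySem.Set.ofList_eq_foldl, List.foldl_flatMap]
  have h : ∀ (ex : List String) (k : String),
      (if k ∈ ex then ex else ex ++ [k]) = PySem.Set.add ex k := by
    intro ex k
    simp only [PySem.Set.add, PySem.Set.contains]
    by_cases hk : k ∈ ex <;> simp [hk]
  simp only [h]

-- filtering a duplicate-free list for one value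
lemma pvFilterSingle {E : List String} (hE : E.Nodup) (p : String) :
    E.filter (fun k => k == p) = if p ∈ E then [p] else [] := by
  rw [List.filter_beq]
  by_cases h : p ∈ E
  · rw [List.count_eq_one_of_mem hE h]; simp [h]
  · rw [List.count_eq_zero.mpr h]; simp [h]

-- grouping by idxOf rank reproduces "preferred ∩ E, then the rest of E"
lemma pvGroup (P : List String) : ∀ (E : List String), P.Nodup → E.Nodup →
    (List.range (P.length + 1)).flatMap (fun j => E.filter (fun k => P.idxOf k == j))
      = P.filter (fun k => decide (k ∈ E)) ++ E.filter (fun k => decide (k ∉ P)) := by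
  induction P with
  | nil =>
    intro E _ _
    simp [List.range_succ]
  | cons p P ih =>
    intro E hP hE
    have hpP : p ∉ P := (List.nodup_cons.mp hP).1
    have hP' : P.Nodup := (List.nodup_cons.mp hP).2
    rw [List.length_cons, List.range_succ_eq_map, List.flatMap_cons, List.flatMap_map]
    have h0 : ∀ k : String, ((p :: P).idxOf k == 0) = (k == p) := by
      intro k
      rw [List.idxOf_cons]
      cases h : p == k
      · have hk : k ≠ p := fun e => by simp [e] at h
        simp [hk]
      · rcases eq_of_beq h with rfl
        simp
    have h1 : ∀ (j : Nat) (k : String),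
        ((p :: P).idxOf k == j + 1) = ((P.idxOf k == j) && !(k == p)) := by
      intro j k
      rw [List.idxOf_cons]
      cases h : p == k
      · have hk : k ≠ p := fun e => by simp [e] at h
        simp [hk]
      · rcases eq_of_beq h with rfl
        simp
    simp only [h0]
    have h2 : (fun j => E.filter (fun k => (p :: P).idxOf k == j + 1))
        = (fun j => (E.filter (fun k => !(k == p))).filter (fun k => P.idxOf k == j)) := by
      funext j
      rw [List.filter_filter]
      exact List.filter_congr (by intro k _; exact h1 j k)
    rw [h2]
    have hE' : (E.filter (fun k => !(k == p))).Nodup := hE.filter _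
    rw [ih (E.filter (fun k => !(k == p))) hP' hE']
    rw [pvFilterSingle hE p]
    have h3 : P.filter (fun k => decide (k ∈ E.filter (fun k => !(k == p))))
        = P.filter (fun k => decide (k ∈ E)) := by
      apply List.filter_congr
      intro k hk
      have hkp : k ≠ p := fun h => hpP (h ▸ hk)
      simp [List.mem_filter, hkp]
    have h4 : (E.filter (fun k => !(k == p))).filter (fun k => decide (k ∉ P))
        = E.filter (fun k => decide (k ∉ p :: P)) := by
      rw [List.filter_filter]
      apply List.filter_congr
      intro k _
      by_cases hkp : k = p <;> by_cases hkP : k ∈ P <;> simp [hkp, hkP]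
    rw [h3, h4, List.filter_cons]
    by_cases hp : p ∈ E <;> simp [hp]

-- each bucket after the fold: the old bucket plus the keys of its rank, in order
lemma pvBuckets (P : List String) (E : List String) : ∀ (bs : List (List String)) (j : Nat),
    (E.foldl (fun bs k => bs.modify (P.idxOf k) (fun b => b ++ [k])) bs)[j]? =
      (bs[j]?).map (fun b => b ++ E.filter (fun k => P.idxOf k == j)) := by
  induction E with
  | nil => intro bs j; simp
  | cons k E ih =>
    intro bs j
    rw [List.foldl_cons, ih, List.getElem?_modify]
    cases hb : bs[j]? with
    | none => simp
    | some b =>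
      simp only [Option.map_some, List.filter_cons]
      by_cases h : P.idxOf k = j <;> simp [h]

-- the flattened buckets are the rank-grouped flatMap
lemma pvBucketsFlatten (P E : List String) :
    ((E.foldl (fun bs k => bs.modify (P.idxOf k) (fun b => b ++ [k]))
        (List.replicate (P.length + 1) [])).flatMap id)
      = (List.range (P.length + 1)).flatMap (fun j => E.filter (fun k => P.idxOf k == j)) := by
  have hb : (E.foldl (fun bs k => bs.modify (P.idxOf k) (fun b => b ++ [k]))
        (List.replicate (P.length + 1) []))
      = (List.range (P.length + 1)).map (fun j => E.filter (fun k => P.idxOf k == j)) := by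
    apply List.ext_getElem?
    intro j
    rw [pvBuckets]
    by_cases hj : j < P.length + 1
    · simp [hj]
    · simp [hj]
  rw [hb, List.flatMap_map]
  simp

-- the index expression in B's port is just idxOf
lemma pvIdxEq (k : String) :
    (if k ∈ pvPreferred then pvPreferred.idxOf k else pvPreferred.length) = pvPreferred.idxOf k := by
  by_cases h : k ∈ pvPreferred
  · simp [h]
  · simp [h]

-- ===== VERDICT (by name: the statement is the Claim_ definition above) =====
theorem get_columns_py_spec : Claim_equal_get_columns_py := by
  intro items _
  unfold Spec_get_columns_py
  have hEB : (pvExistingB items).Nodup := PySem.List.nodup_dedup _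
  have hP : pvPreferred.Nodup := by decide
  -- rewrite B to the rank-grouped form
  have hB : get_columns_py_alt items
      = pvPreferred.filter (fun k => decide (k ∈ pvExistingB items))
        ++ (pvExistingB items).filter (fun k => decide (k ∉ pvPreferred)) := by
    unfold get_columns_py_alt
    simp only [pvIdxEq]
    rw [pvBucketsFlatten, pvGroup pvPreferred (pvExistingB items) hP hEB]
  -- rewrite A to the same form
  have hA : get_columns_py items
      = pvPreferred.filter (fun k => decide (k ∈ pvExistingB items))
        ++ (pvExistingB items).filter (fun k => decide (k ∉ pvPreferred)) := by
    unfold get_columns_py pvColumnsA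
    rw [pvExistingA_eq]
    congr 1
    apply List.filter_congr
    intro k hk
    have : k ∈ pvPreferred.filter (fun key => decide (key ∈ pvExistingB items)) ↔ k ∈ pvPreferred := by
      simp [List.mem_filter, hk]
    simp [this]
  rw [hA, hB]
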